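-- pv_equiv track=rewrite | github.com/YehudaDayan99/Revenue_Classifier | revseg/extraction/core.py | _detect_segment_header_mode
-- ===== SOURCE A (Python) =====
-- from typing import Any, Dict, List, Optional, Set
--
-- def _detect_segment_header_mode(grid: List[List[str]], expected_segments: List[str]) -> bool:
--     """
--     Detect if table uses segment names as header rows with 'Revenue' as a metric row.
--
--     This is common in MSFT's "segment results of operations" tables:
--     - Row: "Productivity and Business Processes" (header)
--     - Row: "Revenue  $XX,XXX  $XX,XXX" (metric)
--     - Row: "Cost of revenue ..."
--     - Row: "Intelligent Cloud" (next header)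
--     - ...
--     """
--     seg_set = {s.lower() for s in expected_segments}
--     found_seg_header = False
--     found_revenue_after = False
--
--     for i, row in enumerate(grid[:50]):
--         if not row:
--             continue
--
--         first = (row[0] or "").strip().lower()
--
--         # Check if this row looks like a segment header
--         if first in seg_set or first == "total":
--             found_seg_header = True
--             continue
--
--         # After finding a segment header, look for "Revenue" row
--         if found_seg_header and first == "revenue":
--             found_revenue_after = True
--             break
--
--     return found_seg_header and found_revenue_after
-- ===== SOURCE B (Python) =====
-- def _detect_segment_header_mode(grid, expected_segments):
--     """Single backward scan: walk the first-50 slice in reverse carrying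
--     'a revenue metric row lies to the right'; succeed at a header row with
--     that flag set."""
--     seg = {s.lower() for s in expected_segments}
--     ok = False
--     revenue_right = False
--     for row in reversed(grid[:50]):
--         if not row:
--             continue
--         f = (row[0] or "").strip().lower()
--         if f in seg or f == "total":
--             ok = ok or revenue_right
--         elif f == "revenue":
--             revenue_right = True
--     return ok
-- ===== Notes on version B (the rewrite author's own statement) =====
-- stated objective: alternative
-- what changed: Replaces A's forward scan with two sticky flags and a break by a single backward scan over the first-50 slice that carries 'a revenue metric row lies to the right' and succeeds when it reaches a header row with that flag set.
import Mathlib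
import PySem

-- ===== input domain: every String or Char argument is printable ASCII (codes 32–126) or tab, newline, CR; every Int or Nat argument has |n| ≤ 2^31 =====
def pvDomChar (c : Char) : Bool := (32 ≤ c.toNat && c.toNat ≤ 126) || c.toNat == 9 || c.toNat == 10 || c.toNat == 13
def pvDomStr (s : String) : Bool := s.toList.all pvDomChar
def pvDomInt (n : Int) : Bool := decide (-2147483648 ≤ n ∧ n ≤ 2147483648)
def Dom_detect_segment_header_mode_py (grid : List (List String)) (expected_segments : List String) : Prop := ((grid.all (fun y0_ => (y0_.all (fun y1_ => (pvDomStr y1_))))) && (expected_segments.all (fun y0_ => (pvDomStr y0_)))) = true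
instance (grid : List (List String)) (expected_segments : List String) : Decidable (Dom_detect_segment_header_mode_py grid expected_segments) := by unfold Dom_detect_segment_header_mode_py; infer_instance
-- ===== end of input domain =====

-- B replaces A's forward flag loop by a single BACKWARD scan of the first-50 slice,
-- carrying "a revenue metric row lies to the right"; same result, similar cost.

-- ===== PORT A =====
-- the for-loop of A: state = found_seg_header; returns found_seg_header && found_revenue_after
def pvLoopA (seg_set : PySem.Set String) : List (List String) → Bool → Bool
  | [], found => found && false
  | row :: rs, found =>
    match row with
    | [] => pvLoopA seg_set rs found          -- if not row: continue
    | c :: _ =>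
      let first := PySem.Str.lower (PySem.Str.strip (if c == "" then "" else c))
      if PySem.Set.contains seg_set first || first == "total" then
        pvLoopA seg_set rs true               -- found_seg_header = True; continue
      else if found && first == "revenue" then
        found && true                         -- found_revenue_after = True; break
      else
        pvLoopA seg_set rs found

def detect_segment_header_mode_py (grid : List (List String)) (expected_segments : List String) : Bool :=
  let seg_set := PySem.Set.ofList (expected_segments.map PySem.Str.lower)
  pvLoopA seg_set (PySem.List.slice grid none (some 50)) false

-- ===== PORT B =====
-- one iteration of B's reverse loop: state = (ok, revenue_right)
def pvStepB (seg : PySem.Set String) (st : Bool × Bool) (row : List String) : Bool × Bool :=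
  match row with
  | [] => st                                  -- if not row: continue
  | c :: _ =>
    let f := PySem.Str.lower (PySem.Str.strip (if c == "" then "" else c))
    if PySem.Set.contains seg f || f == "total" then (st.1 || st.2, st.2)
    else if f == "revenue" then (st.1, true)
    else st

def detect_segment_header_mode_py_alt (grid : List (List String)) (expected_segments : List String) : Bool :=
  let seg := PySem.Set.ofList (expected_segments.map PySem.Str.lower)
  ((PySem.List.slice grid none (some 50)).reverse.foldl (pvStepB seg) (false, false)).1

-- ===== PRECONDITION & SPEC =====
def Spec_detect_segment_header_mode_py (grid : List (List String)) (expected_segments : List String) (out : Bool) : Prop := out = detect_segment_header_mode_py_alt grid expected_segments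
instance (grid : List (List String)) (expected_segments : List String) (out : Bool) : Decidable (Spec_detect_segment_header_mode_py grid expected_segments out) := by unfold Spec_detect_segment_header_mode_py; infer_instance

-- ===== CLAIM (what is proved, stated in full; the proofs are below) =====
def Claim_equal_detect_segment_header_mode_py : Prop := ∀ (grid : List (List String)) (expected_segments : List String), Dom_detect_segment_header_mode_py grid expected_segments → Spec_detect_segment_header_mode_py grid expected_segments (detect_segment_header_mode_py grid expected_segments)

-- ===== LEMMAS AND PROOFS =====
-- proof-only helpers: the cleaned first cell, header test, revenue-metric-row test
def pvFC (row : List String) : Option String :=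
  match row with
  | [] => none
  | c :: _ => some (PySem.Str.lower (PySem.Str.strip (if c == "" then "" else c)))

def pvHdr (seg : PySem.Set String) (row : List String) : Bool :=
  match pvFC row with
  | none => false
  | some f => PySem.Set.contains seg f || f == "total"

def pvRev (seg : PySem.Set String) (row : List String) : Bool :=
  (pvFC row == some "revenue") && !(pvHdr seg row)

-- front-recursive characterisation of A: at the first header row, succeed iff any
-- revenue metric row follows
def pvAspec (seg : PySem.Set String) : List (List String) → Bool
  | [] => false
  | row :: rs => if pvHdr seg row then rs.any (pvRev seg) else pvAspec seg rs

theorem pvAspec_cons (seg : PySem.Set String) (row : List String) (rs : List (List String)) :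
    pvAspec seg (row :: rs) = if pvHdr seg row then rs.any (pvRev seg) else pvAspec seg rs := rfl

-- one step of A's loop, phrased through the abstract row predicates
set_option maxHeartbeats 1000000 in
theorem pvLoopA_step (seg : PySem.Set String) (row : List String) (rs : List (List String)) (b : Bool) :
    pvLoopA seg (row :: rs) b =
      if pvHdr seg row then pvLoopA seg rs true
      else if b && (pvFC row == some "revenue") then b
      else pvLoopA seg rs b := by
  cases row with
  | nil => simp [pvLoopA, pvHdr, pvFC]
  | cons c cs =>
    simp only [pvLoopA, pvHdr, pvFC]
    by_cases hh : (PySem.Set.contains seg (PySem.Str.lower (PySem.Str.strip (if c == "" then "" else c))) || PySem.Str.lower (PySem.Str.strip (if c == "" then "" else c)) == "total") = true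
    · simp only [hh]; simp
    · rw [Bool.not_eq_true] at hh
      simp only [hh]
      cases b <;> simp

-- one step of B's reverse scan, phrased through the same predicates
set_option maxHeartbeats 1000000 in
theorem pvStepB_step (seg : PySem.Set String) (st : Bool × Bool) (row : List String) :
    pvStepB seg st row =
      if pvHdr seg row then (st.1 || st.2, st.2)
      else if pvFC row == some "revenue" then (st.1, true)
      else st := by
  cases row with
  | nil => simp [pvStepB, pvHdr, pvFC]
  | cons c cs =>
    simp only [pvStepB, pvHdr, pvFC]
    by_cases hh : (PySem.Set.contains seg (PySem.Str.lower (PySem.Str.strip (if c == "" then "" else c))) || PySem.Str.lower (PySem.Str.strip (if c == "" then "" else c)) == "total") = true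
    · simp only [hh]; simp
    · rw [Bool.not_eq_true] at hh
      simp only [hh]
      simp

theorem pvLoopA_true (seg : PySem.Set String) (rows : List (List String)) :
    pvLoopA seg rows true = rows.any (pvRev seg) := by
  induction rows with
  | nil => simp [pvLoopA]
  | cons row rs ih =>
    rw [pvLoopA_step, List.any_cons]
    by_cases hh : pvHdr seg row = true
    · simp [pvRev, hh, ih]
    · rw [Bool.not_eq_true] at hh
      by_cases hr : (pvFC row == some "revenue") = true
      · simp [pvRev, hh, hr]
      · rw [Bool.not_eq_true] at hr
        simp [pvRev, hh, hr, ih]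

theorem pvLoopA_false (seg : PySem.Set String) (rows : List (List String)) :
    pvLoopA seg rows false = pvAspec seg rows := by
  induction rows with
  | nil => simp [pvLoopA, pvAspec]
  | cons row rs ih =>
    rw [pvLoopA_step, pvAspec_cons]
    by_cases hh : pvHdr seg row = true
    · simp [hh, pvLoopA_true]
    · rw [Bool.not_eq_true] at hh
      simp [hh, ih]

theorem pvAspec_imp_any (seg : PySem.Set String) (rows : List (List String)) :
    pvAspec seg rows = true → rows.any (pvRev seg) = true := by
  induction rows with
  | nil => simp [pvAspec]
  | cons row rs ih =>
    intro h
    by_cases hh : pvHdr seg row = true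
    · rw [pvAspec_cons, if_pos hh] at h; simp [List.any_cons, h]
    · rw [pvAspec_cons, if_neg hh] at h; simp [List.any_cons, ih h]

-- the invariant of B's backward scan
theorem pvFoldrB (seg : PySem.Set String) (rows : List (List String)) :
    rows.foldr (fun row st => pvStepB seg st row) (false, false)
      = (pvAspec seg rows, rows.any (pvRev seg)) := by
  induction rows with
  | nil => simp [pvAspec]
  | cons row rs ih =>
    rw [List.foldr_cons, ih, pvStepB_step, pvAspec_cons, List.any_cons]
    by_cases hh : pvHdr seg row = true
    · have himp := pvAspec_imp_any seg rs
      simp [pvRev, hh]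
      cases ha : pvAspec seg rs
      · simp
      · simpa [pvRev] using himp ha
    · rw [Bool.not_eq_true] at hh
      by_cases hr : (pvFC row == some "revenue") = true
      · simp [pvRev, hh, hr]
      · rw [Bool.not_eq_true] at hr
        simp [pvRev, hh, hr]

-- ===== VERDICT (by name: the statement is the Claim_ definition above) =====
theorem detect_segment_header_mode_py_spec : Claim_equal_detect_segment_header_mode_py := by
  intro grid expected_segments _
  unfold Spec_detect_segment_header_mode_py detect_segment_header_mode_py detect_segment_header_mode_py_alt
  simp only [List.foldl_reverse, pvFoldrB, pvLoopA_false]
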